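-- pv_equiv track=rewrite | github.com/liyanghua/-OS | apps/template_extraction/features/gallery_analyzer.py | _build_role_seq_top5
-- ===== SOURCE A (Python) =====
-- def _build_role_seq_top5(image_count: int, style_ok: bool, texture_ok: bool) -> list[str]:
--     if image_count <= 0:
--         return []
--     n = min(5, image_count)
--     seq: list[str] = []
--     for i in range(n):
--         pos = i + 1
--         if pos == 1:
--             seq.append("cover_hook")
--         elif pos == 2:
--             seq.append("style_expand" if style_ok else "usage_expand")
--         elif pos == 3:
--             seq.append("texture_expand" if texture_ok else "style_expand")
--         elif pos == 4:
--             seq.append("usage_expand")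
--         else:
--             seq.append("guide_expand")
--     return seq
-- ===== SOURCE B (Python) =====
-- def _build_role_seq_top5(image_count: int, style_ok: bool, texture_ok: bool) -> list[str]:
--     n = min(5, image_count)
--
--     def role(pos: int) -> str:
--         if pos == 1:
--             return "cover_hook"
--         if pos == 2:
--             return "style_expand" if style_ok else "usage_expand"
--         if pos == 3:
--             return "texture_expand" if texture_ok else "style_expand"
--         if pos == 4:
--             return "usage_expand"
--         return "guide_expand"
--
--     def rest(pos: int) -> list[str]:
--         if pos > n:
--             return []
--         return [role(pos)] + rest(pos + 1)
--
--     return rest(1)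
-- ===== Notes on version B (the rewrite author's own statement) =====
-- stated objective: alternative
-- what changed: Replaces the iterative loop that appends to an accumulator with a recursive function rest(pos) that cons-builds the suffix of roles from position pos up to min(5, image_count), with the per-position role factored into a helper; the <=0 guard disappears because the recursion's base case covers it.
import Mathlib
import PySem

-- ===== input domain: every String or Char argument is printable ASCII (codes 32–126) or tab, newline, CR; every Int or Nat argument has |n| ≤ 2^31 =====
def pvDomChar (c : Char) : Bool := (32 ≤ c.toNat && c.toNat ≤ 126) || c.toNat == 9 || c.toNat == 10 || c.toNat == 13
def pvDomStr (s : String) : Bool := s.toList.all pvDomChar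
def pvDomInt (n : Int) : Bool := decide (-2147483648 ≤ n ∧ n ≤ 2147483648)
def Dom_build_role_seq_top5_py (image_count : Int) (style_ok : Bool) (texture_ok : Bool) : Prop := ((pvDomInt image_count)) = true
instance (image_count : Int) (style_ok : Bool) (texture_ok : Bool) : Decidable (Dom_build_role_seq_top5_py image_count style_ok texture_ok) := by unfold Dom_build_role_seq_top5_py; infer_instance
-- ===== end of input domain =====

-- B replaces the append loop by a recursive cons-building of the role suffix from each position (alternative decomposition, same cost).
-- ===== PORT A =====
def build_role_seq_top5_py (image_count : Int) (style_ok : Bool) (texture_ok : Bool) : List String :=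
  if image_count ≤ 0 then []
  else
    let n := min 5 image_count
    (PySem.List.pyRange 0 n 1).foldl (fun seq i =>
      let pos := i + 1
      if pos = 1 then seq ++ ["cover_hook"]
      else if pos = 2 then seq ++ [if style_ok then "style_expand" else "usage_expand"]
      else if pos = 3 then seq ++ [if texture_ok then "texture_expand" else "style_expand"]
      else if pos = 4 then seq ++ ["usage_expand"]
      else seq ++ ["guide_expand"]) []

-- ===== PORT B =====
-- helper 'role' of Source B
def pvRole (style_ok : Bool) (texture_ok : Bool) (pos : Int) : String :=
  if pos = 1 then "cover_hook"
  else if pos = 2 then (if style_ok then "style_expand" else "usage_expand")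
  else if pos = 3 then (if texture_ok then "texture_expand" else "style_expand")
  else if pos = 4 then "usage_expand"
  else "guide_expand"

-- helper 'rest' of Source B: roles for positions pos..n, built by cons recursion
def pvRest (style_ok : Bool) (texture_ok : Bool) (n : Int) (pos : Int) : List String :=
  if h : pos > n then []
  else pvRole style_ok texture_ok pos :: pvRest style_ok texture_ok n (pos + 1)
termination_by (n + 1 - pos).toNat
decreasing_by omega

def build_role_seq_top5_py_alt (image_count : Int) (style_ok : Bool) (texture_ok : Bool) : List String :=
  pvRest style_ok texture_ok (min 5 image_count) 1

-- ===== PRECONDITION & SPEC =====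
def Spec_build_role_seq_top5_py (image_count : Int) (style_ok : Bool) (texture_ok : Bool) (out : List String) : Prop := out = build_role_seq_top5_py_alt image_count style_ok texture_ok
instance (image_count : Int) (style_ok : Bool) (texture_ok : Bool) (out : List String) : Decidable (Spec_build_role_seq_top5_py image_count style_ok texture_ok out) := by unfold Spec_build_role_seq_top5_py; infer_instance

-- ===== CLAIM =====
def Claim_equal_build_role_seq_top5_py : Prop := ∀ (image_count : Int) (style_ok : Bool) (texture_ok : Bool), Dom_build_role_seq_top5_py image_count style_ok texture_ok → Spec_build_role_seq_top5_py image_count style_ok texture_ok (build_role_seq_top5_py image_count style_ok texture_ok)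

-- ===== LEMMAS AND PROOFS =====
theorem pvRest_stop (s t : Bool) (n pos : Int) (h : pos > n) : pvRest s t n pos = [] := by
  rw [pvRest]; simp [h]

theorem pvRest_step (s t : Bool) (n pos : Int) (h : ¬ pos > n) :
    pvRest s t n pos = pvRole s t pos :: pvRest s t n (pos + 1) := by
  rw [pvRest]; simp [h]

-- ===== VERDICT =====
theorem build_role_seq_top5_py_spec : Claim_equal_build_role_seq_top5_py := by
  intro ic s t _
  unfold Spec_build_role_seq_top5_py
  have h : ic ≤ 0 ∨ ic = 1 ∨ ic = 2 ∨ ic = 3 ∨ ic = 4 ∨ 5 ≤ ic := by omega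
  rcases h with h | h | h | h | h | h
  · have he : pvRest s t (min 5 ic) 1 = [] := pvRest_stop s t (min 5 ic) 1 (by omega)
    simp [build_role_seq_top5_py, build_role_seq_top5_py_alt, h, he]
  all_goals first
  | (subst h
     cases s <;> cases t <;>
       norm_num [build_role_seq_top5_py, build_role_seq_top5_py_alt,
                 pvRest_step, pvRest_stop, pvRole, PySem.List.pyRange, List.range_succ, List.foldl] <;> decide)
  | (have h5 : min 5 ic = 5 := by omega
     have h0 : ¬ ic ≤ 0 := by omega
     simp only [build_role_seq_top5_py, build_role_seq_top5_py_alt, h5, if_neg h0]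
     cases s <;> cases t <;>
       norm_num [pvRest_step, pvRest_stop, pvRole, PySem.List.pyRange, List.range_succ, List.foldl] <;> decide)
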